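-- pv_equiv track=rewrite | github.com/daniel-reich/ubiquitous-fiesta | Nh8xqtHAzoiaEyKrv_17.py | correct_sentences
-- ===== SOURCE A (Python) =====
-- def correct_sentences(s):
--
--   Sample = s
--
--   while ("  " in Sample):
--     Sample = Sample.replace("  ", " ")
--
--   while (Sample[0] == " "):
--     Sample = Sample[1:]
--
--   while (Sample[-1] == " "):
--     Sample = Sample[0:-1]
--
--   Answer = Sample[0].upper()
--
--   Counter = 1
--   Length = len(Sample)
--
--   while (Counter < Length):
--
--     Item = Sample[Counter]
--
--     if (Item.isupper()):
--       Answer = Answer + ". " + Item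
--       Counter += 1
--     else:
--       Answer = Answer + Item
--       Counter += 1
--
--   Answer = Answer + "."
--   Answer = Answer.replace(" .", ".")
--   return Answer
-- ===== SOURCE B (Python) =====
-- def correct_sentences(s):
--     # Two-pass rewrite (faster): normalize spaces by split/filter/join, then a sentence-start
--     # index table and slice/join instead of a per-character accumulator loop.
--     u = ' '.join(w for w in s.split(' ') if w)
--     starts = [i for i in range(len(u)) if i == 0 or u[i].isupper()]
--     pieces = [u[a:b] for a, b in zip(starts, starts[1:] + [len(u)])]
--     joined = '. '.join(pieces)
--     return (joined[0].upper() + joined[1:] + '.').replace(' .', '.')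
-- ===== Notes on version B (the rewrite author's own statement) =====
-- stated objective: faster
-- what changed: B normalizes spaces with a single split/filter/join pass instead of A's fixed-point replace(' ',' ') loop plus two character-stripping while-loops, and builds the result from a sentence-start index table with slice/join instead of A's per-character string-accumulator loop.
-- outside the precondition, e.g. on correct_sentences(''): A raises IndexError, B raises IndexError; on correct_sentences('  '): A raises IndexError, B raises IndexError; on correct_sentences(' '): A raises IndexError, B raises IndexError
import Mathlib
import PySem

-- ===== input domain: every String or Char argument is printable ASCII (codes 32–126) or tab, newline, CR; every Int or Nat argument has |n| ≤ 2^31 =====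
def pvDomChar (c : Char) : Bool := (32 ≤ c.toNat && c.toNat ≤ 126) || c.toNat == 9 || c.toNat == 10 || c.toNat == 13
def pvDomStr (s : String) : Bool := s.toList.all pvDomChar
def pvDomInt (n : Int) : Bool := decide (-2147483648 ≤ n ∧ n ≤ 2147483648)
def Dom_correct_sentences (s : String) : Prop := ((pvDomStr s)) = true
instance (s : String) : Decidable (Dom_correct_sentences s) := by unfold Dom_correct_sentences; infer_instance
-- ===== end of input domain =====

-- B replaces A's fixed-point replace/strip space-normalization by one split/filter/join pass and
-- A's per-character accumulator loop by a sentence-start index table with slice/join (measured faster).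

-- ===== PORT A =====
def csCollapse : Nat → List Char → List Char
  | 0, cur => cur
  | fuel+1, cur =>
    if PySem.Chars.isIn [' ', ' '] cur then
      csCollapse fuel (PySem.Chars.replace cur [' ', ' '] [' '])
    else cur

def csStripL : List Char → List Char
  | [] => []
  | c :: t => if c == ' ' then csStripL t else c :: t

def csStripR (l : List Char) : List Char :=
  if h : l.getLast? = some ' ' then csStripR l.dropLast else l
termination_by l.length
decreasing_by
  have hne : l ≠ [] := by intro e; subst e; simp at h
  have hpos : 0 < l.length := List.length_pos_iff.mpr hne
  simp [List.length_dropLast]; omega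

def correct_sentences (s : String) : String :=
  let sample1 := csCollapse s.toList.length s.toList
  let sample2 := csStripL sample1
  let sample3 := csStripR sample2
  let answer0 := PySem.Chars.upper [PySem.List.pyGetD sample3 0 ' ']
  let answer1 := (PySem.List.pyRange 1 (PySem.List.len sample3) 1).foldl
    (fun acc i =>
      if PySem.Chars.isupper (PySem.List.pyGetD sample3 i ' ') then
        acc ++ ['.', ' ', PySem.List.pyGetD sample3 i ' ']
      else acc ++ [PySem.List.pyGetD sample3 i ' '])
    answer0
  String.ofList (PySem.Chars.replace (answer1 ++ ['.']) [' ', '.'] ['.'])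

-- ===== PORT B =====
def correct_sentences_alt (s : String) : String :=
  let u := PySem.Chars.join [' '] ((PySem.Chars.splitOn s.toList [' ']).filter (fun w => !w.isEmpty))
  let starts := (PySem.List.pyRange 0 (PySem.List.len u) 1).filter
      (fun i => i == 0 || PySem.Chars.isupper (PySem.List.pyGetD u i ' '))
  let pieces := (starts.zip (PySem.List.slice starts (some 1) none ++ [PySem.List.len u])).map
      (fun ab => PySem.List.slice u (some ab.1) (some ab.2))
  let joined := PySem.Chars.join ['.', ' '] pieces
  String.ofList (PySem.Chars.replace
    (PySem.Chars.upper [PySem.List.pyGetD joined 0 ' '] ++ PySem.List.slice joined (some 1) none ++ ['.'])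
    [' ', '.'] ['.'])

-- ===== PRECONDITION & SPEC =====
-- Pre_ excludes exactly the inputs with no non-space character (empty or all-space strings),
-- on which the Python A raises IndexError (and B raises IndexError too).
def Pre_correct_sentences (s : String) : Prop := s.toList.any (fun c => c != ' ') = true
instance (s : String) : Decidable (Pre_correct_sentences s) := by unfold Pre_correct_sentences; infer_instance

def pvWitness_correct_sentences : String := "hello World"

def Spec_correct_sentences (s : String) (out : String) : Prop := out = correct_sentences_alt s
instance (s : String) (out : String) : Decidable (Spec_correct_sentences s out) := by unfold Spec_correct_sentences; infer_instance

-- ===== CLAIM (what is proved, stated in full; the proofs are below) =====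
def Claim_equal_correct_sentences : Prop := ∀ (s : String), Dom_correct_sentences s → Pre_correct_sentences s → Spec_correct_sentences s (correct_sentences s)

-- ===== LEMMAS AND PROOFS =====

def spc (c : Char) : Bool := c == ' '
def nonsp (c : Char) : Bool := !(c == ' ')

def repSS : List Char → List Char
  | [] => []
  | [c] => [c]
  | c :: d :: t => if c == ' ' && d == ' ' then ' ' :: repSS t else c :: repSS (d :: t)

def wordsR : List Char → List (List Char)
  | [] => []
  | c :: t =>
    if c == ' ' then wordsR t
    else (c :: t.takeWhile nonsp) :: wordsR (t.dropWhile nonsp)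
termination_by l => l.length
decreasing_by
  · simp
  · have := List.length_dropWhile_le nonsp t
    simp; omega

def normU (l : List Char) : List Char := List.intercalate [' '] (wordsR l)

lemma wordsR_cons_space (t : List Char) : wordsR (' ' :: t) = wordsR t := by
  simp [wordsR]

lemma wordsR_cons_nonspace (c : Char) (t : List Char) (h : ¬ c = ' ') :
    wordsR (c :: t) = (c :: t.takeWhile nonsp) :: wordsR (t.dropWhile nonsp) := by
  simp [wordsR, h]

lemma repSS_cons_nonspace (d : Char) (rest : List Char) (hd : ¬ d = ' ') :
    repSS (d :: rest) = d :: repSS rest := by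
  cases rest with
  | nil => rfl
  | cons e t => simp [repSS, hd]

lemma repSS_nonspace_prefix (w r : List Char) (hw : ∀ c ∈ w, ¬ c = ' ') :
    repSS (w ++ r) = w ++ repSS r := by
  induction w with
  | nil => simp
  | cons d w' IH =>
    have hd : ¬ d = ' ' := hw d (by simp)
    rw [List.cons_append, repSS_cons_nonspace d (w' ++ r) hd,
      IH (fun c hc => hw c (by simp [hc]))]
    rfl

lemma repSS_space_head (r' : List Char) : ∃ y, repSS (' ' :: r') = ' ' :: y := by
  cases r' with
  | nil => exact ⟨[], rfl⟩
  | cons d t =>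
    by_cases hd : d = ' '
    · subst hd; exact ⟨repSS t, by simp [repSS]⟩
    · exact ⟨repSS (d :: t), by simp [repSS, hd]⟩

lemma tw_app (p : Char → Bool) (w r : List Char) (hw : ∀ e ∈ w, p e = true)
    (hr : r.takeWhile p = []) :
    (w ++ r).takeWhile p = w ∧ (w ++ r).dropWhile p = r := by
  induction w with
  | nil =>
    constructor
    · simpa using hr
    · cases r with
      | nil => simp
      | cons d t =>
        cases hpd : p d with
        | true => rw [List.takeWhile_cons_of_pos hpd] at hr; simp at hr
        | false => simp [List.dropWhile, hpd]
  | cons d w' IH =>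
    have hpd : p d = true := hw d (by simp)
    have ⟨h1, h2⟩ := IH (fun e he => hw e (by simp [he]))
    constructor
    · simp [List.takeWhile, hpd, h1]
    · simp [List.dropWhile, hpd, h2]

lemma wordsR_repSS : ∀ (n : Nat) (l : List Char), l.length ≤ n → wordsR (repSS l) = wordsR l := by
  intro n
  induction n with
  | zero => intro l hl; have : l = [] := by cases l <;> simp_all
            subst this; rfl
  | succ n IH =>
    intro l hl
    match l with
    | [] => rfl
    | c :: t =>
      by_cases hc : c = ' '
      · subst hc
        match t with
        | [] => rfl
        | d :: t' =>
          by_cases hd : d = ' '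
          · subst hd
            rw [show repSS (' ' :: ' ' :: t') = ' ' :: repSS t' from by simp [repSS]]
            rw [wordsR_cons_space, wordsR_cons_space, wordsR_cons_space]
            exact IH t' (by simp only [List.length_cons] at hl; omega)
          · rw [show repSS (' ' :: d :: t') = ' ' :: repSS (d :: t') from by simp [repSS, hd]]
            rw [wordsR_cons_space, wordsR_cons_space]
            exact IH (d :: t') (by simp only [List.length_cons] at hl ⊢; omega)
      · -- c ≠ ' '
        have htw : t = t.takeWhile nonsp ++ t.dropWhile nonsp := (List.takeWhile_append_dropWhile).symm
        set w := t.takeWhile nonsp with hw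
        set r := t.dropWhile nonsp with hr
        have hwns : ∀ e ∈ w, ¬ e = ' ' := by
          intro e he
          have := List.mem_takeWhile_imp (hw ▸ he)
          simpa [nonsp] using this
        have hrtw : r.takeWhile nonsp = [] := by
          cases hrr : r with
          | nil => simp
          | cons d r' =>
            have hd2 : List.dropWhile nonsp t = d :: r' := by rw [← hr, hrr]
            have hws := List.head_dropWhile_not nonsp (l := t) (by rw [hd2]; simp)
            simp only [hd2, List.head_cons] at hws
            simp [List.takeWhile, hws]
        have hrep : repSS (c :: t) = (c :: w) ++ repSS r := by
          conv_lhs => rw [show c :: t = (c :: w) ++ r from by rw [List.cons_append, ← htw]]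
          exact repSS_nonspace_prefix (c :: w) r (by
            intro e he
            rcases List.mem_cons.mp he with rfl | he'
            · exact hc
            · exact hwns e he')
        have hreptw : (repSS r).takeWhile nonsp = [] := by
          cases hrr : r with
          | nil => simp [repSS]
          | cons d r' =>
            have hd2 : List.dropWhile nonsp t = d :: r' := by rw [← hr, hrr]
            have hws := List.head_dropWhile_not nonsp (l := t) (by rw [hd2]; simp)
            simp only [hd2, List.head_cons] at hws
            have hdsp : d = ' ' := by simpa [nonsp] using hws
            subst hdsp
            obtain ⟨y, hy⟩ := repSS_space_head r'
            simp [hy, List.takeWhile, nonsp]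
        have hwns' : ∀ e ∈ w, nonsp e = true := by
          intro e he; simpa [nonsp] using hwns e he
        obtain ⟨ht1, ht2⟩ := tw_app nonsp w (repSS r) hwns' hreptw
        rw [hrep, List.cons_append, wordsR_cons_nonspace c _ hc, ht1, ht2]
        rw [wordsR_cons_nonspace c t hc, ← hw, ← hr]
        have hrlen : r.length ≤ n := by
          have h1 : r.length ≤ t.length := by rw [hr]; exact List.length_dropWhile_le nonsp t
          simp only [List.length_cons] at hl
          omega
        rw [IH r hrlen]


lemma repSS_go : ∀ (fuel : Nat) (l acc : List Char), l.length ≤ fuel →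
    PySem.Chars.replace.go [' ', ' '] [' '] fuel l acc = acc.reverse ++ repSS l := by
  intro fuel
  induction fuel with
  | zero =>
    intro l acc hl
    have : l = [] := by cases l <;> simp_all
    subst this
    simp [PySem.Chars.replace.go, repSS]
  | succ fuel IH =>
    intro l acc hl
    match l with
    | [] => simp [PySem.Chars.replace.go, repSS]
    | [c] =>
      rw [PySem.Chars.replace.go]
      have hpre : [' ', ' '].isPrefixOf [c] = false := by
        simp [List.isPrefixOf]
      simp only [hpre]
      simp only [Bool.false_eq_true, if_false]
      rw [IH [] (c :: acc) (by simp)]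
      simp [repSS]
    | c :: d :: t =>
      rw [PySem.Chars.replace.go]
      by_cases hcd : c = ' ' ∧ d = ' '
      · obtain ⟨hc, hd⟩ := hcd; subst hc; subst hd
        have hpre : [' ', ' '].isPrefixOf (' ' :: ' ' :: t) = true := by
          simp [List.isPrefixOf]
        simp only [hpre, if_true]
        have e1 : List.drop [' ', ' '].length (' ' :: ' ' :: t) = t := rfl
        have e2 : [' '].reverse ++ acc = ' ' :: acc := rfl
        rw [e1, e2, IH t (' ' :: acc) (by simp at hl ⊢; omega)]
        simp [repSS]
      · have hpre : [' ', ' '].isPrefixOf (c :: d :: t) = false := by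
          simp [List.isPrefixOf]; intro hc hd; exact hcd ⟨hc.symm, hd.symm⟩
        simp only [hpre, Bool.false_eq_true, if_false]
        rw [IH (d :: t) (c :: acc) (by simp at hl ⊢; omega)]
        have : (c == ' ' && d == ' ') = false := by
          simp; intro hc hd; exact hcd ⟨hc, hd⟩
        simp [repSS, this]

lemma replace_eq_repSS (l : List Char) : PySem.Chars.replace l [' ', ' '] [' '] = repSS l := by
  rw [PySem.Chars.replace]
  simp only [List.isEmpty_cons, if_false]
  rw [repSS_go l.length l [] le_rfl]
  simp

lemma repSS_length_le (l : List Char) : (repSS l).length ≤ l.length := by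
  induction l using repSS.induct with
  | case1 => simp [repSS]
  | case2 c => simp [repSS]
  | case3 c d t h IH => simp [repSS, h] at IH ⊢; omega
  | case4 c d t h IH => simp [repSS, h] at IH ⊢; omega

lemma repSS_length_lt (l : List Char) (h : [' ', ' '] <:+: l) : (repSS l).length < l.length := by
  induction l using repSS.induct with
  | case1 => simp at h
  | case2 c =>
    exfalso
    obtain ⟨p, s, hps⟩ := h
    apply_fun List.length at hps
    simp at hps; omega
  | case3 c d t hcd IH =>
    have := repSS_length_le t
    simp [repSS, hcd]; omega
  | case4 c d t hcd IH =>
    have hinf : [' ', ' '] <:+: d :: t := by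
      rcases List.infix_cons_iff.mp h with hp | hi
      · exfalso
        rcases hp with ⟨s, hs⟩
        simp at hs
        obtain ⟨h1, h2, -⟩ := hs
        subst h1; subst h2
        simp at hcd
      · exact hi
    have := IH hinf
    simp [repSS, hcd] at this ⊢
    omega

lemma collapse_spec : ∀ (fuel : Nat) (l : List Char), l.length ≤ fuel →
    wordsR (csCollapse fuel l) = wordsR l ∧ ¬ ([' ', ' '] <:+: csCollapse fuel l) := by
  intro fuel
  induction fuel with
  | zero =>
    intro l hl
    have : l = [] := by cases l <;> simp_all
    subst this
    constructor
    · rfl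
    · intro h
      have := h.length_le
      simp [csCollapse] at this
  | succ fuel IH =>
    intro l hl
    rw [csCollapse]
    cases hin : PySem.Chars.isIn [' ', ' '] l with
    | false =>
      rw [if_neg (by simp)]
      exact ⟨rfl, (PySem.Chars.isIn_eq_false_iff _ _).mp hin⟩
    | true =>
      rw [if_pos rfl]
      rw [replace_eq_repSS]
      have hinf : [' ', ' '] <:+: l := (PySem.Chars.isIn_iff_infix _ _).mp hin
      have hlt := repSS_length_lt l hinf
      obtain ⟨h1, h2⟩ := IH (repSS l) (by omega)
      refine ⟨?_, h2⟩
      rw [h1, wordsR_repSS l.length l le_rfl]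

lemma stripL_eq (l : List Char) : csStripL l = l.dropWhile spc := by
  induction l with
  | nil => rfl
  | cons c t IH =>
    by_cases hc : c = ' '
    · subst hc; simp [csStripL, List.dropWhile, spc, IH]
    · simp only [csStripL, List.dropWhile_cons, spc]
      rw [if_neg (by simp [hc]), if_neg (by simp [hc])]

lemma stripR_eq : ∀ (n : Nat) (l : List Char), l.length ≤ n → csStripR l = l.rdropWhile spc := by
  intro n
  induction n with
  | zero =>
    intro l hl
    have : l = [] := by cases l <;> simp_all
    subst this; rw [csStripR]; simp
  | succ n IH =>
    intro l hl
    rw [csStripR]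
    by_cases h : l.getLast? = some ' '
    · simp only [h, dif_pos]
      have hne : l ≠ [] := by intro e; subst e; simp at h
      have hlast : l.getLast hne = ' ' := by
        have := List.getLast?_eq_getLast (l := l) hne
        rw [h] at this; exact (Option.some_inj.mp this.symm)
      rw [IH l.dropLast (by
        have hpos : 0 < l.length := List.length_pos_iff.mpr hne
        simp [List.length_dropLast]; omega)]
      conv_rhs => rw [← List.dropLast_append_getLast hne]
      rw [hlast, List.rdropWhile_concat_pos spc l.dropLast ' ' (by simp [spc])]
    · rw [dif_neg h]
      refine (List.rdropWhile_eq_self_iff.mpr ?_).symm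
      intro hl' hsp
      apply h
      have hlast : l.getLast hl' = ' ' := by simpa [spc] using hsp
      rw [List.getLast?_eq_getLast hl', hlast]

lemma dropWhile_append_keep' (p : Char → Bool) (m x : List Char) (hm : ∃ c ∈ m, p c = false) :
    (m ++ x).dropWhile p = m.dropWhile p ++ x := by
  rw [List.dropWhile_append]
  have : m.dropWhile p ≠ [] := by
    intro he
    obtain ⟨c, hc, hpc⟩ := hm
    have := List.dropWhile_eq_nil_iff.mp he c hc
    simp [this] at hpc
  simp [List.isEmpty_iff, this]

lemma rdropWhile_append_keep (x m : List Char) (hm : ∃ c ∈ m, spc c = false) :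
    (x ++ m).rdropWhile spc = x ++ m.rdropWhile spc := by
  unfold List.rdropWhile
  rw [List.reverse_append]
  rw [dropWhile_append_keep' spc m.reverse x.reverse (by
    obtain ⟨c, hc, hpc⟩ := hm
    exact ⟨c, by simpa using hc, hpc⟩)]
  simp

lemma infix_tail {c : Char} {t : List Char} (h : ¬ [' ', ' '] <:+: c :: t) :
    ¬ [' ', ' '] <:+: t := fun hi => h (hi.trans (List.suffix_cons c t).isInfix)

lemma intercalate_cons_ne (sep a : List Char) (L : List (List Char)) (h : L ≠ []) :
    List.intercalate sep (a :: L) = a ++ sep ++ List.intercalate sep L := by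
  cases L with
  | nil => exact absurd rfl h
  | cons b L' => simp [List.intercalate, List.intersperse]

lemma trimmed_eq : ∀ (n : Nat) (l : List Char), l.length ≤ n → ¬ ([' ', ' '] <:+: l) →
    (l.dropWhile spc).rdropWhile spc = normU l := by
  intro n
  induction n with
  | zero =>
    intro l hl _
    have : l = [] := by cases l <;> simp_all
    subst this; simp [normU, wordsR, List.rdropWhile, List.intercalate]
  | succ n IH =>
    intro l hl hnd
    match l with
    | [] => simp [normU, wordsR, List.rdropWhile, List.intercalate]
    | c :: t =>
      by_cases hc : c = ' '
      · subst hc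
        rw [show List.dropWhile spc (' ' :: t) = List.dropWhile spc t from by simp [List.dropWhile, spc]]
        rw [show normU (' ' :: t) = normU t from by unfold normU; rw [wordsR_cons_space]]
        exact IH t (by simp only [List.length_cons] at hl; omega) (infix_tail hnd)
      · rw [show List.dropWhile spc (c :: t) = c :: t from by
          simp only [List.dropWhile_cons, spc]; rw [if_neg (by simp [hc])]]
        set w := t.takeWhile nonsp with hw
        set r := t.dropWhile nonsp with hr
        have htw : t = w ++ r := (List.takeWhile_append_dropWhile).symm
        have hwns : ∀ e ∈ w, ¬ e = ' ' := by
          intro e he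
          have := List.mem_takeWhile_imp (hw ▸ he)
          simpa [nonsp] using this
        have hcwlast : ∀ (h : (c :: w) ≠ []), ¬ spc ((c :: w).getLast h) = true := by
          intro h hsp
          have hmem := List.getLast_mem h
          rcases List.mem_cons.mp hmem with he | he
          · rw [he] at hsp; simp [spc] at hsp; exact hc hsp
          · exact hwns _ he (by simpa [spc] using hsp)
        have hwrd : wordsR (c :: t) = (c :: w) :: wordsR r := by
          rw [wordsR_cons_nonspace c t hc, ← hw, ← hr]
        have hrsuf : r <:+ t := hr ▸ List.dropWhile_suffix nonsp
        cases hrr : r with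
        | nil =>
          have htww : t = w := by rw [htw, hrr, List.append_nil]
          have hnr : normU (c :: t) = c :: w := by
            unfold normU; rw [hwrd, hrr]; simp [List.intercalate, wordsR]
          rw [hnr, show c :: t = c :: w from by rw [htww]]
          exact List.rdropWhile_eq_self_iff.mpr hcwlast
        | cons d r' =>
          have hdsp : d = ' ' := by
            have hd2 : List.dropWhile nonsp t = d :: r' := by rw [← hr, hrr]
            have hws := List.head_dropWhile_not nonsp (l := t) (by rw [hd2]; simp)
            simp only [hd2, List.head_cons] at hws
            simpa [nonsp] using hws
          subst hdsp
          have hwr_eq : wordsR r = wordsR r' := by rw [hrr, wordsR_cons_space]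
          cases hr'' : r' with
          | nil =>
            have hnr : normU (c :: t) = c :: w := by
              unfold normU; rw [hwrd, hwr_eq, hr'']; simp [List.intercalate, wordsR]
            have hct : c :: t = (c :: w) ++ [' '] := by
              rw [show c :: t = (c :: w) ++ r from by simp [← htw], hrr, hr'']
            rw [hnr, hct]
            rw [List.rdropWhile_concat_pos spc (c :: w) ' ' (by simp [spc])]
            exact List.rdropWhile_eq_self_iff.mpr hcwlast
          | cons d2 r2 =>
            have hd2ns : ¬ d2 = ' ' := by
              intro he
              apply hnd
              have h1 : [' ', ' '] <+: r := by rw [hrr, hr'', he]; exact ⟨r2, rfl⟩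
              exact h1.isInfix.trans (hrsuf.isInfix.trans (List.suffix_cons c t).isInfix)
            have hlhs : c :: t = ((c :: w) ++ [' ']) ++ r' := by
              rw [show c :: t = (c :: w) ++ r from by simp [← htw], hrr]
              simp
            have hnr : normU (c :: t) = (c :: w) ++ [' '] ++ normU r' := by
              unfold normU
              rw [hwrd, hwr_eq]
              rw [intercalate_cons_ne [' '] (c :: w) (wordsR r') (by
                rw [hr'', wordsR_cons_nonspace d2 r2 hd2ns]; simp)]
            rw [hnr, hlhs]
            rw [rdropWhile_append_keep ((c :: w) ++ [' ']) r' (by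
              rw [hr'']; exact ⟨d2, by simp, by simp [spc, hd2ns]⟩)]
            have hr'n : r'.length ≤ n := by
              have h1 : r.length ≤ t.length := hrsuf.length_le
              rw [hrr] at h1
              simp only [List.length_cons] at hl h1
              omega
            have hr'nd : ¬ [' ', ' '] <:+: r' := by
              intro hi
              apply hnd
              have : r' <:+ r := by rw [hrr]; exact List.suffix_cons ' ' r'
              exact hi.trans ((this.trans hrsuf).isInfix.trans (List.suffix_cons c t).isInfix)
            have hIH := IH r' hr'n hr'nd
            rw [show List.dropWhile spc r' = r' from by
              rw [hr'']
              simp only [List.dropWhile_cons, spc]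
              rw [if_neg (by simp [hd2ns])]] at hIH
            rw [hIH]

def consFirst (pre : List Char) : List (List Char) → List (List Char)
  | [] => [pre]
  | h :: r => (pre ++ h) :: r

def SPc : List Char → List (List Char)
  | [] => [[]]
  | c :: t => if c == ' ' then [] :: SPc t else consFirst [c] (SPc t)

lemma SPc_ne_nil (l : List Char) : SPc l ≠ [] := by
  cases l with
  | nil => simp [SPc]
  | cons c t =>
    by_cases hc : c = ' '
    · simp [SPc, hc]
    · simp only [SPc]
      rw [if_neg (by simp [hc])]
      cases h : SPc t <;> simp [consFirst]

lemma consFirst_nil_ne (L : List (List Char)) (h : L ≠ []) : consFirst [] L = L := by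
  cases L with
  | nil => exact absurd rfl h
  | cons a r => simp [consFirst]

lemma consFirst_assoc (a b : List Char) (L : List (List Char)) :
    consFirst a (consFirst b L) = consFirst (a ++ b) L := by
  cases L <;> simp [consFirst]

lemma splitOn_go_spec : ∀ (fuel : Nat) (l cur : List Char) (acc : List (List Char)), l.length ≤ fuel →
    PySem.Chars.splitOn.go [' '] fuel l cur acc = acc.reverse ++ consFirst cur.reverse (SPc l) := by
  intro fuel
  induction fuel with
  | zero =>
    intro l cur acc hl
    have : l = [] := by cases l <;> simp_all
    subst this
    simp [PySem.Chars.splitOn.go, SPc, consFirst]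
  | succ fuel IH =>
    intro l cur acc hl
    match l with
    | [] => simp [PySem.Chars.splitOn.go, SPc, consFirst]
    | c :: t =>
      rw [PySem.Chars.splitOn.go]
      by_cases hc : c = ' '
      · subst hc
        have hpre : [' '].isPrefixOf (' ' :: t) = true := by simp [List.isPrefixOf]
        rw [if_pos hpre]
        have e1 : List.drop [' '].length (' ' :: t) = t := rfl
        rw [e1, IH t [] (cur.reverse :: acc) (by simp only [List.length_cons] at hl; omega)]
        rw [show SPc (' ' :: t) = [] :: SPc t from by simp [SPc]]
        rw [List.reverse_nil, consFirst_nil_ne (SPc t) (SPc_ne_nil t)]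
        cases h : SPc t with
        | nil => exact absurd h (SPc_ne_nil t)
        | cons a L => simp [consFirst]
      · have hpre : [' '].isPrefixOf (c :: t) = false := by
          simp [List.isPrefixOf]; exact fun h => hc h.symm
        rw [if_neg (by simp [hpre])]
        rw [IH t (c :: cur) acc (by simp only [List.length_cons] at hl; omega)]
        rw [show SPc (c :: t) = consFirst [c] (SPc t) from by
          simp only [SPc]; rw [if_neg (by simp [hc])]]
        rw [consFirst_assoc]
        simp

lemma splitOn_eq_SPc (l : List Char) : PySem.Chars.splitOn l [' '] = SPc l := by
  rw [PySem.Chars.splitOn]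
  rw [splitOn_go_spec (l.length + 1) l [] [] (by omega)]
  simp [consFirst_nil_ne (SPc l) (SPc_ne_nil l)]

def SPrest (t : List Char) : List (List Char) :=
  match t.dropWhile nonsp with
  | [] => []
  | _ :: r => SPc r

lemma SPc_decomp : ∀ (t : List Char), SPc t = t.takeWhile nonsp :: SPrest t := by
  intro t
  induction t with
  | nil => simp [SPc, SPrest]
  | cons c t IH =>
    by_cases hc : c = ' '
    · subst hc
      rw [show SPc (' ' :: t) = [] :: SPc t from by simp [SPc]]
      simp [List.takeWhile_cons, nonsp, SPrest, List.dropWhile_cons]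
    · rw [show SPc (c :: t) = consFirst [c] (SPc t) from by
        simp only [SPc]; rw [if_neg (by simp [hc])]]
      rw [IH]
      simp only [consFirst]
      rw [show List.takeWhile nonsp (c :: t) = c :: List.takeWhile nonsp t from by
        simp [List.takeWhile_cons, nonsp, hc]]
      rw [show SPrest (c :: t) = SPrest t from by
        unfold SPrest
        rw [show List.dropWhile nonsp (c :: t) = List.dropWhile nonsp t from by
          simp [List.dropWhile_cons, nonsp, hc]]]
      simp

lemma words_eq : ∀ (n : Nat) (l : List Char), l.length ≤ n →
    (SPc l).filter (fun w => !w.isEmpty) = wordsR l := by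
  intro n
  induction n with
  | zero =>
    intro l hl
    have : l = [] := by cases l <;> simp_all
    subst this
    simp [SPc, wordsR]
  | succ n IH =>
    intro l hl
    match l with
    | [] => simp [SPc, wordsR]
    | c :: t =>
      by_cases hc : c = ' '
      · subst hc
        rw [show SPc (' ' :: t) = [] :: SPc t from by simp [SPc]]
        rw [wordsR_cons_space]
        rw [show List.filter (fun w => !w.isEmpty) ([] :: SPc t) =
          List.filter (fun w => !w.isEmpty) (SPc t) from by simp]
        exact IH t (by simp only [List.length_cons] at hl; omega)
      · rw [show SPc (c :: t) = consFirst [c] (SPc t) from by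
          simp only [SPc]; rw [if_neg (by simp [hc])]]
        rw [SPc_decomp t]
        simp only [consFirst]
        rw [wordsR_cons_nonspace c t hc]
        rw [show List.filter (fun w => !w.isEmpty) (([c] ++ List.takeWhile nonsp t) :: SPrest t) =
          ([c] ++ List.takeWhile nonsp t) :: List.filter (fun w => !w.isEmpty) (SPrest t) from by simp]
        simp only [List.singleton_append, List.cons.injEq, true_and]
        unfold SPrest
        cases hd : List.dropWhile nonsp t with
        | nil => simp [wordsR]
        | cons d r =>
          have hrn : r.length ≤ n := by
            have h1 : (List.dropWhile nonsp t).length ≤ t.length := List.length_dropWhile_le nonsp t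
            rw [hd] at h1
            simp only [List.length_cons] at hl h1
            omega
          have hdsp : d = ' ' := by
            have hws := List.head_dropWhile_not nonsp (l := t) (by rw [hd]; simp)
            simp only [hd, List.head_cons] at hws
            simpa [nonsp] using hws
          subst hdsp
          rw [wordsR_cons_space]
          exact IH r hrn

lemma altU_eq (l : List Char) :
    PySem.Chars.join [' '] ((PySem.Chars.splitOn l [' ']).filter (fun w => !w.isEmpty)) = normU l := by
  rw [splitOn_eq_SPc, words_eq l.length l le_rfl]
  simp [PySem.Chars.join, normU]

lemma A_norm (l : List Char) : csStripR (csStripL (csCollapse l.length l)) = normU l := by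
  obtain ⟨hwd, hnd⟩ := collapse_spec l.length l le_rfl
  rw [stripL_eq, stripR_eq (List.dropWhile spc (csCollapse l.length l)).length _ le_rfl]
  rw [trimmed_eq (csCollapse l.length l).length _ le_rfl hnd]
  unfold normU
  rw [hwd]

lemma normU_head (l : List Char) (h : ∃ c ∈ l, ¬ c = ' ') : ∃ c r, normU l = c :: r := by
  induction l with
  | nil => simp at h
  | cons c t IH =>
    by_cases hc : c = ' '
    · subst hc
      have ht : ∃ e ∈ t, ¬ e = ' ' := by
        obtain ⟨e, he, hne⟩ := h
        rcases List.mem_cons.mp he with rfl | he'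
        · exact absurd rfl hne
        · exact ⟨e, he', hne⟩
      obtain ⟨c2, r2, hr⟩ := IH ht
      exact ⟨c2, r2, by rwa [show normU (' ' :: t) = normU t from by unfold normU; rw [wordsR_cons_space]]⟩
    · refine ⟨c, ?_, ?_⟩
      · exact (List.takeWhile nonsp t) ++ (if wordsR (List.dropWhile nonsp t) = [] then [] else [' '] ++ List.intercalate [' '] (wordsR (List.dropWhile nonsp t)))
      · unfold normU
        rw [wordsR_cons_nonspace c t hc]
        cases hwr : wordsR (List.dropWhile nonsp t) with
        | nil => simp [List.intercalate]
        | cons a L =>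
          rw [intercalate_cons_ne [' '] _ _ (by simp)]
          simp

def br (c : Char) : List Char := if PySem.Chars.isupper c then ['.', ' ', c] else [c]

def nbS (u : List Char) : List Nat :=
  (List.range u.length).filter (fun i => i == 0 || PySem.Chars.isupper (u.getD i ' '))

def piecesN (u : List Char) : List (List Char) :=
  ((nbS u).zip ((nbS u).tail ++ [u.length])).map (fun ab => (u.drop ab.1).take (ab.2 - ab.1))

def JN (u : List Char) : List Char := List.intercalate ['.', ' '] (piecesN u)

lemma mem_nbS_lt (u : List Char) : ∀ a ∈ nbS u, a < u.length := by
  intro a ha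
  unfold nbS at ha
  exact List.mem_range.mp (List.mem_of_mem_filter ha)

lemma nbS_ne_nil (u : List Char) (hu : u ≠ []) : nbS u ≠ [] := by
  have h0 : 0 ∈ nbS u := by
    unfold nbS
    apply List.mem_filter.mpr
    constructor
    · exact List.mem_range.mpr (List.length_pos_iff.mpr hu)
    · simp
  exact List.ne_nil_of_mem h0

lemma nbS_append (u : List Char) (x : Char) (hu : u ≠ []) :
    nbS (u ++ [x]) = nbS u ++ if PySem.Chars.isupper x then [u.length] else [] := by
  unfold nbS
  rw [List.length_append, List.length_cons, List.length_nil]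
  rw [show u.length + (0 + 1) = u.length + 1 from by omega]
  rw [List.range_succ, List.filter_append]
  congr 1
  · apply List.filter_congr
    intro i hi
    have hilt : i < u.length := List.mem_range.mp hi
    rw [List.getD_append u [x] ' ' i hilt]
  · have hne : u.length ≠ 0 := by
      intro he; exact hu (List.length_eq_zero_iff.mp he)
    have hgd : (u ++ [x]).getD u.length ' ' = x := by
      rw [List.getD_eq_getElem?_getD]
      simp
    simp only [List.filter, hgd]
    have hb0 : (u.length == 0) = false := by simpa using hne
    by_cases hx : PySem.Chars.isupper x
    · simp [hx, hb0]
    · simp [hx, hb0]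

lemma zip_tail_last {α : Type} : ∀ (bs : List α) (h : bs ≠ []) (m : α),
    bs.zip (bs.tail ++ [m]) = bs.dropLast.zip bs.tail ++ [(bs.getLast h, m)] := by
  intro bs
  induction bs with
  | nil => intro h; exact absurd rfl h
  | cons a r IH =>
    intro h m
    cases r with
    | nil => simp
    | cons b r' =>
      have hr : (b :: r') ≠ [] := by simp
      have := IH hr m
      simp only [List.tail_cons] at this ⊢
      rw [show (b :: r') ++ [m] = b :: (r' ++ [m]) from by simp]
      rw [show (a :: b :: r').zip (b :: (r' ++ [m])) = (a, b) :: ((b :: r').zip (r' ++ [m])) from rfl]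
      rw [this]
      simp [List.getLast_cons hr]

lemma zip_tail_append {α : Type} (bs : List α) (h : bs ≠ []) (e m : α) :
    (bs ++ [e]).zip ((bs ++ [e]).tail ++ [m]) = bs.zip (bs.tail ++ [e]) ++ [(e, m)] := by
  have htl : (bs ++ [e]).tail = bs.tail ++ [e] := by
    cases bs with
    | nil => exact absurd rfl h
    | cons a r => simp
  rw [htl]
  rw [List.zip_append (by
    cases bs with
    | nil => exact absurd rfl h
    | cons a r => simp)]
  simp

lemma intercalate_append_singleton (sep q : List Char) (L : List (List Char)) (h : L ≠ []) :
    List.intercalate sep (L ++ [q]) = List.intercalate sep L ++ sep ++ q := by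
  induction L with
  | nil => exact absurd rfl h
  | cons a L' IH =>
    cases L' with
    | nil => simp [List.intercalate, List.intersperse]
    | cons b L'' =>
      rw [List.cons_append, intercalate_cons_ne sep a ((b :: L'') ++ [q]) (by simp)]
      rw [intercalate_cons_ne sep a (b :: L'') (by simp)]
      rw [IH (by simp)]
      simp [List.append_assoc]

lemma intercalate_extend_last (sep q r : List Char) : ∀ (L : List (List Char)),
    List.intercalate sep (L ++ [q ++ r]) = List.intercalate sep (L ++ [q]) ++ r := by
  intro L
  induction L with
  | nil => simp [List.intercalate, List.intersperse]
  | cons a L' IH =>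
    rw [List.cons_append, List.cons_append]
    rw [intercalate_cons_ne sep a (L' ++ [q ++ r]) (by simp)]
    rw [intercalate_cons_ne sep a (L' ++ [q]) (by simp)]
    rw [IH]
    simp [List.append_assoc]

lemma piecesN_ne_nil (u : List Char) (hu : u ≠ []) : piecesN u ≠ [] := by
  unfold piecesN
  cases hbs : nbS u with
  | nil => exact absurd hbs (nbS_ne_nil u hu)
  | cons a r => simp

lemma JN_spec (c : Char) : ∀ (t : List Char), JN (c :: t) = c :: t.flatMap br := by
  intro t
  induction t using List.reverseRecOn with
  | nil =>
    unfold JN piecesN nbS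
    simp [List.range_one, List.intercalate]
  | append_singleton t x IH =>
    have hu : (c :: t) ≠ [] := by simp
    have hn : (c :: t).length = t.length + 1 := by simp
    have hca : c :: (t ++ [x]) = (c :: t) ++ [x] := by simp
    rw [hca]
    by_cases hp : PySem.Chars.isupper x
    · -- new bound at position (c::t).length
      have hnb : nbS ((c :: t) ++ [x]) = nbS (c :: t) ++ [(c :: t).length] := by
        rw [nbS_append (c :: t) x hu]; simp [hp]
      have hpc : piecesN ((c :: t) ++ [x]) = piecesN (c :: t) ++ [[x]] := by
        unfold piecesN
        rw [hnb]
        rw [show ((c :: t) ++ [x]).length = (c :: t).length + 1 from by simp]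
        rw [zip_tail_append (nbS (c :: t)) (nbS_ne_nil _ hu) (c :: t).length ((c :: t).length + 1)]
        rw [List.map_append]
        congr 1
        · apply List.map_congr_left
          intro ab hab
          obtain ⟨ha, hb⟩ := List.of_mem_zip hab
          have ha' : ab.1 < (c :: t).length := mem_nbS_lt _ _ ha
          have hb' : ab.2 ≤ (c :: t).length := by
            rcases List.mem_append.mp hb with hb1 | hb2
            · exact le_of_lt (mem_nbS_lt _ _ (List.mem_of_mem_tail hb1))
            · simp at hb2; omega
          rw [List.drop_append_of_le_length (le_of_lt ha')]
          rw [List.take_append_of_le_length (by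
            rw [List.length_drop]; omega)]
        · simp
      rw [JN, hpc, intercalate_append_singleton _ _ _ (piecesN_ne_nil _ hu)]
      rw [← JN, IH]
      rw [List.flatMap_append]
      simp [br, hp]
    · -- no new bound
      have hnb : nbS ((c :: t) ++ [x]) = nbS (c :: t) := by
        rw [nbS_append (c :: t) x hu]; simp [hp]
      have hlast := List.dropLast_append_getLast (nbS_ne_nil (c :: t) hu)
      set bs := nbS (c :: t) with hbs
      set lb := bs.getLast (nbS_ne_nil (c :: t) hu) with hlb
      have hlblt : lb < (c :: t).length := mem_nbS_lt _ _ (List.getLast_mem _)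
      have hpc : piecesN ((c :: t) ++ [x]) =
          (bs.dropLast.zip bs.tail).map (fun ab => (((c :: t)).drop ab.1).take (ab.2 - ab.1))
            ++ [((c :: t)).drop lb ++ [x]] := by
        unfold piecesN
        rw [hnb]
        rw [show ((c :: t) ++ [x]).length = (c :: t).length + 1 from by simp]
        rw [zip_tail_last bs (by rw [hbs]; exact nbS_ne_nil _ hu) ((c :: t).length + 1)]
        rw [List.map_append]
        congr 1
        · apply List.map_congr_left
          intro ab hab
          obtain ⟨ha, hb⟩ := List.of_mem_zip hab
          have ha' : ab.1 < (c :: t).length := mem_nbS_lt _ _ (List.dropLast_subset _ ha)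
          have hb' : ab.2 < (c :: t).length := mem_nbS_lt _ _ (List.mem_of_mem_tail hb)
          rw [List.drop_append_of_le_length (le_of_lt ha')]
          rw [List.take_append_of_le_length (by
            rw [List.length_drop]; omega)]
        · simp only [List.map_cons, List.map_nil, ← hlb]
          rw [List.drop_append_of_le_length (le_of_lt hlblt)]
          rw [List.take_of_length_le (by
            simp [List.length_drop]; omega)]
      have hpcu : piecesN (c :: t) =
          (bs.dropLast.zip bs.tail).map (fun ab => (((c :: t)).drop ab.1).take (ab.2 - ab.1))
            ++ [((c :: t)).drop lb] := by
        unfold piecesN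
        rw [zip_tail_last bs (by rw [hbs]; exact nbS_ne_nil _ hu) (c :: t).length]
        rw [List.map_append]
        congr 1
        simp only [List.map_cons, List.map_nil, ← hlb]
        rw [List.take_of_length_le (by rw [List.length_drop])]
      rw [JN, hpc, intercalate_extend_last]
      rw [← hpcu, ← JN, IH]
      rw [List.flatMap_append]
      simp [br, hp]

lemma starts_eq (u : List Char) :
    (PySem.List.pyRange 0 (PySem.List.len u) 1).filter
      (fun i => i == 0 || PySem.Chars.isupper (PySem.List.pyGetD u i ' '))
    = (nbS u).map (fun i : Nat => (i : Int)) := by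
  rw [show PySem.List.len u = (u.length : Int) from by simp]
  rw [show PySem.List.pyRange 0 (u.length : Int) 1 = (List.range u.length).map (fun k : Nat => (k : Int)) from
    PySem.List.pyRange_zero_nat u.length]
  rw [List.filter_map]
  unfold nbS
  congr 1
  apply List.filter_congr
  intro i _
  have : ((i : Int) == 0) = (i == 0) := by
    by_cases h : i = 0 <;> simp [h]
  simp [Function.comp, this]

lemma altPieces_eq (u : List Char) :
    (((nbS u).map (fun i : Nat => (i : Int))).zip
      (PySem.List.slice ((nbS u).map (fun i : Nat => (i : Int))) (some 1) none ++ [PySem.List.len u])).map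
      (fun ab => PySem.List.slice u (some ab.1) (some ab.2)) = piecesN u := by
  rw [PySem.List.slice_from_one]
  rw [show ((nbS u).map (fun i : Nat => (i : Int))).tail = (nbS u).tail.map (fun i : Nat => (i : Int)) from
    (List.map_tail).symm ▸ rfl]
  rw [show PySem.List.len u = (u.length : Int) from by simp]
  rw [show ((nbS u).tail.map (fun i : Nat => (i : Int))) ++ [(u.length : Int)] =
      ((nbS u).tail ++ [u.length]).map (fun i : Nat => (i : Int)) from by simp]
  rw [List.zip_map]
  rw [List.map_map]
  unfold piecesN
  apply List.map_congr_left
  intro ab _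
  simp [Function.comp, PySem.List.slice_natCast]

lemma A_loop_eq (u init : List Char) :
    (PySem.List.pyRange 1 (PySem.List.len u) 1).foldl
      (fun acc i =>
        if PySem.Chars.isupper (PySem.List.pyGetD u i ' ') then
          acc ++ ['.', ' ', PySem.List.pyGetD u i ' ']
        else acc ++ [PySem.List.pyGetD u i ' ']) init
    = init ++ (u.drop 1).flatMap br := by
  have h := PySem.List.foldl_pyRange_pyGetD u ' '
      (fun acc item => if PySem.Chars.isupper item then acc ++ ['.', ' ', item] else acc ++ [item])
      init (a := 1) (by norm_num)
  have h2 : (PySem.List.pyRange 1 (PySem.List.len u) 1).foldl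
      (fun acc i =>
        if PySem.Chars.isupper (PySem.List.pyGetD u i ' ') then
          acc ++ ['.', ' ', PySem.List.pyGetD u i ' ']
        else acc ++ [PySem.List.pyGetD u i ' ']) init
      = (u.drop 1).foldl
        (fun acc item => if PySem.Chars.isupper item then acc ++ ['.', ' ', item] else acc ++ [item]) init := h
  rw [h2]
  have h3 : (fun (acc : List Char) (item : Char) =>
      if PySem.Chars.isupper item then acc ++ ['.', ' ', item] else acc ++ [item]) =
      (fun acc item => acc ++ br item) := by
    funext acc item
    by_cases hi : PySem.Chars.isupper item <;> simp [br, hi]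
  rw [h3]
  exact PySem.List.foldl_append_eq_flatMap br (u.drop 1) init


lemma final_eq (s : String) (hpre : s.toList.any (fun c => c != ' ') = true) :
    correct_sentences s = correct_sentences_alt s := by
  have hex : ∃ c ∈ s.toList, ¬ c = ' ' := by
    obtain ⟨c, hc, hne⟩ := List.any_eq_true.mp hpre
    exact ⟨c, hc, by simpa using hne⟩
  obtain ⟨c, r, hu⟩ := normU_head s.toList hex
  unfold correct_sentences correct_sentences_alt
  simp only []
  rw [A_norm s.toList, altU_eq s.toList, hu]
  -- A side
  rw [A_loop_eq (c :: r) (PySem.Chars.upper [PySem.List.pyGetD (c :: r) 0 ' '])]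
  -- B side
  rw [starts_eq (c :: r), altPieces_eq (c :: r)]
  rw [show PySem.Chars.join ['.', ' '] (piecesN (c :: r)) = JN (c :: r) from by
    simp [PySem.Chars.join, JN]]
  rw [JN_spec c r]
  rw [show PySem.List.pyGetD (c :: r) 0 ' ' = c from PySem.List.pyGetD_zero_cons c r ' ']
  rw [show PySem.List.pyGetD (c :: List.flatMap br r) 0 ' ' = c from
    PySem.List.pyGetD_zero_cons c _ ' ']
  rw [PySem.List.slice_from_one]
  simp [PySem.Chars.upper]


-- ===== VERDICT (by name: the statement is the Claim_ definition above) =====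
theorem correct_sentences_spec : Claim_equal_correct_sentences := by
  intro s _hdom hpre
  unfold Spec_correct_sentences
  exact final_eq s hpre
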